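-- pv_equiv track=rewrite | github.com/BeichenY1/AncientCompare | 01-traverse.py | find_common_substrings
-- ===== SOURCE A (Python) =====
-- def find_common_substrings(s1, s2, min_length=4):
--     """
--     Find common substrings between s1 and s2 with a minimum length of min_length.
--     Returns a list of tuples containing (substring, start_index_s1, end_index_s1, start_index_s2, end_index_s2).
--     """
--     common_substrings = []
--     len_s1 = len(s1)
--
--     for i in range(len_s1):
--         for j in range(i + min_length, len_s1 + 1):
--             substring = s1[i:j]
--             if substring in s2:
--                 start_index_s2 = s2.index(substring)
--                 common_substrings.append((substring, i, j, start_index_s2, start_index_s2 + (j - i)))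
--
--     return common_substrings
-- ===== SOURCE B (Python) =====
-- def find_common_substrings(s1, s2, min_length=4):
--     n = len(s1)
--     result = []
--     for i in range(n):
--         p = 0
--         for j in range(i + min_length, n + 1):
--             p = s2.find(s1[i:j], p)
--             if p == -1:
--                 break
--             result.append((s1[i:j], i, j, p, p + (j - i)))
--     return result
-- ===== Notes on version B (the rewrite author's own statement) =====
-- stated objective: alternative
-- what changed: Instead of running a fresh 'substring in s2' scan plus a from-scratch s2.index for every pair (i, j), B keeps one monotone leftmost-occurrence pointer p per start i (leftmost occurrences can only move right as the substring grows) and extends the match with s2.find(sub, p), breaking out of the j-loop at the first failed search.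
import Mathlib
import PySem

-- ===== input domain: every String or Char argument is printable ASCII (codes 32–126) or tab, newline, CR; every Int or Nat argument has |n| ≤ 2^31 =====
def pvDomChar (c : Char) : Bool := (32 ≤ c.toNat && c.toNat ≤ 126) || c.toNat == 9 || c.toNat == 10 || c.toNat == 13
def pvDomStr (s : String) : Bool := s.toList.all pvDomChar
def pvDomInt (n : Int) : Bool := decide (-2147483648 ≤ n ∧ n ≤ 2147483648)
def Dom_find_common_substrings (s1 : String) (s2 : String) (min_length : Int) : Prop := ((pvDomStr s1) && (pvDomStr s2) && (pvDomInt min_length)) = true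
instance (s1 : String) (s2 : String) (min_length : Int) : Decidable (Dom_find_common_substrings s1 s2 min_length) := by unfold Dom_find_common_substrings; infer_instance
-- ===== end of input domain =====

-- B replaces A's per-pair substring search ('substring in s2' plus a from-scratch s2.index
-- for every (i, j)) by one monotone leftmost-occurrence pointer per start i, advanced with
-- s2.find(sub, p), breaking at the first failed search (objective: alternative; same
-- return value on min_length ≥ 0).

-- ===== PORT A =====
def find_common_substrings (s1 : String) (s2 : String) (min_length : Int) : List (String × Int × Int × Int × Int) :=
  let len_s1 : Int := PySem.Str.len s1
  (PySem.List.pyRange 0 len_s1 1).foldl (fun acc i =>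
    (PySem.List.pyRange (i + min_length) (len_s1 + 1) 1).foldl (fun acc j =>
      let substring := PySem.Str.slice s1 (some i) (some j)
      if PySem.Str.isIn substring s2 then
        -- s2.index(substring): equal to s2.find(substring) because 'substring in s2' holds on this branch
        let start_index_s2 := PySem.Str.find s2 substring
        acc ++ [(substring, i, j, start_index_s2, start_index_s2 + (j - i))]
      else acc) acc) []

-- ===== PORT B =====
-- inner 'for j in range(i + min_length, n + 1)' loop of Source B, with its break:
-- fuel = number of remaining iterations; p = monotone leftmost-occurrence pointer
def fcsAltInner (s1 : String) (s2 : String) (i : Int)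
    (fuel : Nat) (j : Int) (p : Int) (result : List (String × Int × Int × Int × Int)) :
    List (String × Int × Int × Int × Int) :=
  match fuel with
  | 0 => result
  | fuel' + 1 =>
    let p' := PySem.Str.findFrom s2 (PySem.Str.slice s1 (some i) (some j)) p none
    if p' = -1 then result
    else fcsAltInner s1 s2 i fuel' (j + 1) p'
      (result ++ [(PySem.Str.slice s1 (some i) (some j), i, j, p', p' + (j - i))])

def find_common_substrings_alt (s1 : String) (s2 : String) (min_length : Int) : List (String × Int × Int × Int × Int) :=
  let n : Int := PySem.Str.len s1
  (PySem.List.pyRange 0 n 1).foldl (fun result i =>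
    fcsAltInner s1 s2 i ((n + 1) - (i + min_length)).toNat (i + min_length) 0 result) []


-- ===== PRECONDITION & SPEC =====
-- Pre_ restricts to the natural domain min_length ≥ 0 (a substring length is a count).
-- For negative min_length, A's inner range includes j < 0, where s1[i:j] wraps via Python's
-- negative-slice rules: the substring reported for such a j is not s1[i:j] in the intended
-- sense and A's per-pair leftmost occurrence then disagrees with B's monotone pointer,
-- whose monotonicity argument is sound only for substrings growing from a fixed start.
def Pre_find_common_substrings (s1 : String) (s2 : String) (min_length : Int) : Prop := 0 ≤ min_length
instance (s1 : String) (s2 : String) (min_length : Int) : Decidable (Pre_find_common_substrings s1 s2 min_length) := by unfold Pre_find_common_substrings; infer_instance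
def pvWitness_find_common_substrings : String × String × Int := ("abcab", "xabcy", 2)

def Spec_find_common_substrings (s1 : String) (s2 : String) (min_length : Int) (out : List (String × Int × Int × Int × Int)) : Prop := out = find_common_substrings_alt s1 s2 min_length
instance (s1 : String) (s2 : String) (min_length : Int) (out : List (String × Int × Int × Int × Int)) : Decidable (Spec_find_common_substrings s1 s2 min_length out) := by unfold Spec_find_common_substrings; infer_instance

-- ===== CLAIM (what is proved, stated in full; the proofs are below) =====
def Claim_equal_find_common_substrings : Prop := ∀ (s1 : String) (s2 : String) (min_length : Int), Dom_find_common_substrings s1 s2 min_length → Pre_find_common_substrings s1 s2 min_length → Spec_find_common_substrings s1 s2 min_length (find_common_substrings s1 s2 min_length)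

-- ===== LEMMAS AND PROOFS =====

def occSet (s1 s2 : String) (i c : Nat) : List Int :=
  (PySem.List.pyRange 0 ((s2.toList.length : Int) + 1) 1).filter
    (fun p => decide ((s2.toList.drop p.toNat).take c = (s1.toList.drop i).take c)
              && decide (p + (c : Int) ≤ (s2.toList.length : Int)))

theorem slice_toList (s1 : String) (i c : Nat) :
    (PySem.Str.slice s1 (some (i : Int)) (some ((i : Int) + (c : Int)))).toList
      = (s1.toList.drop i).take c := by
  simp [PySem.List.slice_natCast_add]

theorem sub_length (s1 : String) (i c : Nat) (hn : i + c ≤ s1.toList.length) :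
    ((s1.toList.drop i).take c).length = c := by
  rw [List.length_take, List.length_drop]; omega

theorem pred_iff_prefix (s1 s2 : String) (i c : Nat) (hc : 1 ≤ c) (hn : i + c ≤ s1.toList.length) (q : Nat) :
    ((s2.toList.drop q).take c = (s1.toList.drop i).take c ∧ (q : Int) + (c : Int) ≤ (s2.toList.length : Int))
      ↔ (s1.toList.drop i).take c <+: s2.toList.drop q := by
  rw [List.prefix_iff_eq_take, sub_length s1 i c hn]
  constructor
  · rintro ⟨h, _⟩; exact h.symm
  · intro h
    refine ⟨h.symm, ?_⟩
    have hle : c ≤ (s2.toList.drop q).length := by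
      have := congrArg List.length h
      rw [sub_length s1 i c hn, List.length_take] at this
      omega
    rw [List.length_drop] at hle
    omega

theorem occSet_mem_iff (s1 s2 : String) (i c : Nat) (hc : 1 ≤ c) (hn : i + c ≤ s1.toList.length) (q : Nat) :
    (q : Int) ∈ occSet s1 s2 i c ↔ (s1.toList.drop i).take c <+: s2.toList.drop q := by
  unfold occSet
  rw [List.mem_filter]
  simp only [Bool.and_eq_true, decide_eq_true_eq, Int.toNat_natCast, PySem.List.mem_pyRange_one]
  constructor
  · rintro ⟨_, h⟩
    exact (pred_iff_prefix s1 s2 i c hc hn q).mp h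
  · intro h
    obtain ⟨he, hb⟩ := (pred_iff_prefix s1 s2 i c hc hn q).mpr h
    exact ⟨⟨by omega, by omega⟩, he, hb⟩

theorem occSet_ne_nil_iff (s1 s2 : String) (i c : Nat) (hc : 1 ≤ c) (hn : i + c ≤ s1.toList.length) :
    occSet s1 s2 i c ≠ [] ↔
      PySem.Str.isIn (PySem.Str.slice s1 (some (i : Int)) (some ((i : Int) + (c : Int)))) s2 = true := by
  simp only [PySem.Str.isIn_eq, slice_toList]
  rw [← PySem.Chars.exists_prefix_drop_iff_isIn]
  constructor
  · intro h
    obtain ⟨p, hp⟩ := List.exists_mem_of_ne_nil _ h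
    have hp' := hp
    unfold occSet at hp'
    rw [List.mem_filter, PySem.List.mem_pyRange_one] at hp'
    obtain ⟨q, rfl⟩ : ∃ q : Nat, p = (q : Int) := ⟨p.toNat, by omega⟩
    exact ⟨q, (occSet_mem_iff s1 s2 i c hc hn q).mp hp⟩
  · rintro ⟨j, hj⟩
    intro hnil
    have : (j : Int) ∈ occSet s1 s2 i c := (occSet_mem_iff s1 s2 i c hc hn j).mpr hj
    rw [hnil] at this
    exact absurd this (List.not_mem_nil)

theorem occSet_mono_nil (s1 s2 : String) (i c c' : Nat) (hcc : c ≤ c')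
    (h : occSet s1 s2 i c = []) : occSet s1 s2 i c' = [] := by
  rw [List.eq_nil_iff_forall_not_mem] at h ⊢
  intro p hp
  unfold occSet at hp h
  rw [List.mem_filter] at hp
  obtain ⟨hmem, hpred⟩ := hp
  apply h p
  rw [List.mem_filter]
  refine ⟨hmem, ?_⟩
  simp only [Bool.and_eq_true, decide_eq_true_eq] at hpred ⊢
  obtain ⟨ht, hb⟩ := hpred
  refine ⟨?_, by omega⟩
  have := congrArg (List.take c) ht
  simpa [List.take_take, Nat.min_eq_left hcc] using this

theorem occSet_sorted (s1 s2 : String) (i c : Nat) :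
    (occSet s1 s2 i c).Pairwise (· < ·) := by
  unfold occSet
  have hp : (PySem.List.pyRange 0 ((s2.toList.length : Int) + 1) 1).Pairwise (· < ·) := by
    rw [PySem.List.pyRange_one]
    exact List.pairwise_lt_range.map _ (fun a b hab => by omega)
  exact List.Pairwise.sublist List.filter_sublist hp

theorem occSet_head (s1 s2 : String) (i c : Nat) (hc : 1 ≤ c) (hn : i + c ≤ s1.toList.length)
    (p0 : Int) (rest : List Int) (h : occSet s1 s2 i c = p0 :: rest) :
    PySem.Str.find s2 (PySem.Str.slice s1 (some (i : Int)) (some ((i : Int) + (c : Int)))) = p0 := by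
  have hne : occSet s1 s2 i c ≠ [] := by rw [h]; exact List.cons_ne_nil _ _
  have hin := (occSet_ne_nil_iff s1 s2 i c hc hn).mp hne
  rw [PySem.Str.isIn_eq] at hin
  have hf : 0 ≤ PySem.Chars.find s2.toList ((PySem.Str.slice s1 (some (i : Int)) (some ((i : Int) + (c : Int)))).toList) := by
    rw [PySem.Chars.find_nonneg_iff]
    exact (PySem.Chars.isIn_iff_infix _ _).mp hin
  simp only [PySem.Str.find_eq]
  rw [slice_toList] at hf ⊢
  set F := PySem.Chars.find s2.toList ((s1.toList.drop i).take c) with hF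
  obtain ⟨hpre, hmin⟩ := PySem.Chars.find_spec hf
  -- p0 is a member with a prefix occurrence
  have hp0mem : p0 ∈ occSet s1 s2 i c := by rw [h]; exact List.mem_cons_self
  have hp0nn : 0 ≤ p0 := by
    have := hp0mem
    unfold occSet at this
    rw [List.mem_filter, PySem.List.mem_pyRange_one] at this
    exact this.1.1
  obtain ⟨q0, rfl⟩ : ∃ q0 : Nat, p0 = (q0 : Int) := ⟨p0.toNat, by omega⟩
  have hq0pre := (occSet_mem_iff s1 s2 i c hc hn q0).mp hp0mem
  -- F ≤ p0
  have h1 : F ≤ (q0 : Int) := by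
    by_contra hlt
    exact hmin q0 (by omega) hq0pre
  -- p0 ≤ F : F is a member, and the head of a <-sorted list is minimal
  have hFmem : (F.toNat : Int) ∈ occSet s1 s2 i c :=
    (occSet_mem_iff s1 s2 i c hc hn F.toNat).mpr hpre
  have h2 : (q0 : Int) ≤ (F.toNat : Int) := by
    rw [h] at hFmem
    rcases List.mem_cons.mp hFmem with he | hm
    · omega
    · have hs := occSet_sorted s1 s2 i c
      rw [h] at hs
      have := (List.pairwise_cons.mp hs).1 _ hm
      omega
  omega

def fcsEntry (s1 s2 : String) (i j : Int) : String × Int × Int × Int × Int :=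
  (PySem.Str.slice s1 (some i) (some j), i, j,
   PySem.Str.find s2 (PySem.Str.slice s1 (some i) (some j)),
   PySem.Str.find s2 (PySem.Str.slice s1 (some i) (some j)) + (j - i))

theorem pyRange_one_nil (a b : Int) (h : b ≤ a) : PySem.List.pyRange a b 1 = [] := by
  rw [PySem.List.pyRange_one]
  have : (b - a).toNat = 0 := by omega
  rw [this]
  rfl

theorem occSet_mem_bounds (s1 s2 : String) (i c : Nat) (x : Int) (h : x ∈ occSet s1 s2 i c) :
    0 ≤ x ∧ x ≤ (s2.toList.length : Int) := by
  unfold occSet at h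
  rw [List.mem_filter, PySem.List.mem_pyRange_one] at h
  exact ⟨h.1.1, by have := h.1.2; omega⟩

theorem occSet_mono_mem (s1 s2 : String) (i c c' : Nat) (hcc : c ≤ c') (x : Int)
    (h : x ∈ occSet s1 s2 i c') : x ∈ occSet s1 s2 i c := by
  unfold occSet at h ⊢
  rw [List.mem_filter] at h ⊢
  obtain ⟨hmem, hpred⟩ := h
  refine ⟨hmem, ?_⟩
  simp only [Bool.and_eq_true, decide_eq_true_eq] at hpred ⊢
  obtain ⟨ht, hb⟩ := hpred
  refine ⟨?_, by omega⟩
  have := congrArg (List.take c) ht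
  simpa [List.take_take, Nat.min_eq_left hcc] using this

theorem findFrom_of_nil (s1 s2 : String) (i c : Nat) (hc : 1 ≤ c) (hn : i + c ≤ s1.toList.length)
    (pN : Nat) (hpm : pN ≤ s2.toList.length) (h : occSet s1 s2 i c = []) :
    PySem.Str.findFrom s2 (PySem.Str.slice s1 (some (i : Int)) (some ((i : Int) + (c : Int)))) (pN : Int) none = -1 := by
  simp only [PySem.Str.findFrom_eq]
  rw [PySem.Chars.findFrom_natCast_eq_neg_one_iff _ _ pN (by simpa using hpm)]
  rw [slice_toList]
  intro hinf
  have hisin : PySem.Chars.isIn ((s1.toList.drop i).take c) (s2.toList.drop pN) = true :=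
    (PySem.Chars.isIn_iff_infix _ _).mpr hinf
  obtain ⟨q, hq⟩ := (PySem.Chars.exists_prefix_drop_iff_isIn _ _).mpr hisin
  rw [List.drop_drop] at hq
  have : ((pN + q : Nat) : Int) ∈ occSet s1 s2 i c := by
    apply (occSet_mem_iff s1 s2 i c hc hn (pN + q)).mpr
    exact hq
  rw [h] at this
  exact absurd this (List.not_mem_nil)

theorem findFrom_of_cons (s1 s2 : String) (i c : Nat) (hc : 1 ≤ c) (hn : i + c ≤ s1.toList.length)
    (pN : Nat) (hpm : pN ≤ s2.toList.length) (p0 : Int) (rest : List Int)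
    (h : occSet s1 s2 i c = p0 :: rest) (hmin : ∀ x ∈ occSet s1 s2 i c, (pN : Int) ≤ x) :
    PySem.Str.findFrom s2 (PySem.Str.slice s1 (some (i : Int)) (some ((i : Int) + (c : Int)))) (pN : Int) none = p0 := by
  have hp0mem : p0 ∈ occSet s1 s2 i c := by rw [h]; exact List.mem_cons_self
  have hp0b := occSet_mem_bounds s1 s2 i c p0 hp0mem
  have hp0p := hmin p0 hp0mem
  obtain ⟨q0, rfl⟩ : ∃ q0 : Nat, p0 = (q0 : Int) := ⟨p0.toNat, by omega⟩
  have hq0pre := (occSet_mem_iff s1 s2 i c hc hn q0).mp hp0mem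
  simp only [PySem.Str.findFrom_eq]
  rw [slice_toList]
  have hne : PySem.Chars.findFrom s2.toList ((s1.toList.drop i).take c) (pN : Int) none ≠ -1 := by
    intro heq
    rw [PySem.Chars.findFrom_natCast_eq_neg_one_iff _ _ pN (by simpa using hpm)] at heq
    apply heq
    apply (PySem.Chars.isIn_iff_infix _ _).mp
    apply (PySem.Chars.exists_prefix_drop_iff_isIn _ _).mp
    refine ⟨q0 - pN, ?_⟩
    rw [List.drop_drop]
    have : pN + (q0 - pN) = q0 := by omega
    rwa [this]
  obtain ⟨hge, hpre, hminF⟩ := PySem.Chars.findFrom_natCast_spec s2.toList _ pN (by simpa using hpm) hne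
  set F := PySem.Chars.findFrom s2.toList ((s1.toList.drop i).take c) (pN : Int) none with hF
  have hFnn : 0 ≤ F := by omega
  have hFmem : ((F.toNat : Nat) : Int) ∈ occSet s1 s2 i c :=
    (occSet_mem_iff s1 s2 i c hc hn F.toNat).mpr hpre
  -- F ≤ q0 : otherwise q0 ∈ [pN, F) carries an occurrence, contradicting minimality
  have h1 : F ≤ (q0 : Int) := by
    by_contra hlt
    exact hminF q0 (by omega) (by omega) hq0pre
  -- q0 ≤ F : q0 is the head of the <-sorted occurrence list F belongs to
  have h2 : (q0 : Int) ≤ (F.toNat : Int) := by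
    rw [h] at hFmem
    rcases List.mem_cons.mp hFmem with he | hm
    · omega
    · have hs := occSet_sorted s1 s2 i c
      rw [h] at hs
      have := (List.pairwise_cons.mp hs).1 _ hm
      omega
  omega

theorem inner_spec (s1 s2 : String) (i : Nat) :
    ∀ (fuel : Nat) (c : Nat) (p : Int) (acc : List (String × Int × Int × Int × Int)), 1 ≤ c →
      fuel = ((s1.toList.length : Int) + 1 - ((i : Int) + (c : Int))).toNat →
      0 ≤ p → p ≤ (s2.toList.length : Int) →
      (∀ x ∈ occSet s1 s2 i c, p ≤ x) →
      fcsAltInner s1 s2 (i : Int) fuel ((i : Int) + (c : Int)) p acc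
        = acc ++ ((PySem.List.pyRange ((i : Int) + (c : Int)) ((s1.toList.length : Int) + 1) 1).filter
              (fun j => PySem.Str.isIn (PySem.Str.slice s1 (some (i : Int)) (some j)) s2)).map
            (fcsEntry s1 s2 (i : Int)) := by
  intro fuel
  induction fuel with
  | zero =>
    intro c p acc hc hfuel hp0 hpm hmin
    rw [fcsAltInner]
    rw [pyRange_one_nil _ _ (by omega)]
    simp
  | succ f ih =>
    intro c p acc hc hfuel hp0 hpm hmin
    have hcn : i + c ≤ s1.toList.length := by omega
    obtain ⟨pN, rfl⟩ : ∃ pN : Nat, p = (pN : Int) := ⟨p.toNat, by omega⟩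
    have hpmN : pN ≤ s2.toList.length := by omega
    simp only [fcsAltInner]
    rcases hocc : occSet s1 s2 i c with _ | ⟨p0, rest⟩
    · rw [if_pos (findFrom_of_nil s1 s2 i c hc hcn pN hpmN hocc)]
      have hfe : ((PySem.List.pyRange ((i : Int) + (c : Int)) ((s1.toList.length : Int) + 1) 1).filter
              (fun j => PySem.Str.isIn (PySem.Str.slice s1 (some (i : Int)) (some j)) s2)) = [] := by
        rw [List.filter_eq_nil_iff]
        intro j hj
        rw [PySem.List.mem_pyRange_one] at hj
        obtain ⟨k, hk⟩ : ∃ k : Nat, j = (i : Int) + (k : Int) := ⟨(j - i).toNat, by omega⟩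
        have hck : c ≤ k := by omega
        have hkn : i + k ≤ s1.toList.length := by omega
        subst hk
        rw [Bool.not_eq_true, ← Bool.not_eq_true]
        intro hisin
        have := (occSet_ne_nil_iff s1 s2 i k (by omega) hkn).mpr hisin
        exact this (occSet_mono_nil s1 s2 i c k hck hocc)
      rw [hfe]
      simp
    · have hFF := findFrom_of_cons s1 s2 i c hc hcn pN hpmN p0 rest hocc
        (by rw [hocc] at hmin ⊢; exact hmin)
      rw [hFF]
      have hp0b := occSet_mem_bounds s1 s2 i c p0 (by rw [hocc]; exact List.mem_cons_self)
      rw [if_neg (by omega)]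
      have hcast : ((i : Int) + (c : Int) + 1) = ((i : Int) + ((c + 1 : Nat) : Int)) := by push_cast; ring
      rw [hcast]
      rw [ih (c + 1) p0 _ (by omega) (by omega) (by omega) (by omega) (by
        intro x hx
        have hx' := occSet_mono_mem s1 s2 i c (c + 1) (by omega) x hx
        rw [hocc] at hx'
        rcases List.mem_cons.mp hx' with he | hm
        · omega
        · have hs := occSet_sorted s1 s2 i c
          rw [hocc] at hs
          have := (List.pairwise_cons.mp hs).1 _ hm
          omega)]
      conv_rhs => rw [PySem.List.pyRange_one_cons (show (i : Int) + (c : Int) < (s1.toList.length : Int) + 1 by omega)]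
      rw [List.filter_cons_of_pos (by
        exact (occSet_ne_nil_iff s1 s2 i c hc hcn).mp (by rw [hocc]; exact List.cons_ne_nil _ _))]
      rw [List.map_cons]
      have hentry : fcsEntry s1 s2 (i : Int) ((i : Int) + (c : Int))
          = (PySem.Str.slice s1 (some (i : Int)) (some ((i : Int) + (c : Int))), (i : Int), (i : Int) + (c : Int), p0, p0 + ((i : Int) + (c : Int) - (i : Int))) := by
        unfold fcsEntry
        rw [occSet_head s1 s2 i c hc hcn p0 rest hocc]
      rw [hentry]
      simp only [List.append_assoc, List.singleton_append]
      rw [← hcast]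

theorem A_inner (s1 s2 : String) (ml i : Int) (acc : List (String × Int × Int × Int × Int)) :
    (PySem.List.pyRange (i + ml) (PySem.Str.len s1 + 1) 1).foldl (fun acc j =>
        let substring := PySem.Str.slice s1 (some i) (some j)
        if PySem.Str.isIn substring s2 then
          let start_index_s2 := PySem.Str.find s2 substring
          acc ++ [(substring, i, j, start_index_s2, start_index_s2 + (j - i))]
        else acc) acc
      = acc ++ ((PySem.List.pyRange (i + ml) (PySem.Str.len s1 + 1) 1).filter
            (fun j => PySem.Str.isIn (PySem.Str.slice s1 (some i) (some j)) s2)).map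
          (fcsEntry s1 s2 i) := by
  have hfun : (fun (acc : List (String × Int × Int × Int × Int)) j =>
        let substring := PySem.Str.slice s1 (some i) (some j)
        if PySem.Str.isIn substring s2 then
          let start_index_s2 := PySem.Str.find s2 substring
          acc ++ [(substring, i, j, start_index_s2, start_index_s2 + (j - i))]
        else acc)
      = (fun acc j => if (fun j => PySem.Str.isIn (PySem.Str.slice s1 (some i) (some j)) s2) j
          then acc ++ [fcsEntry s1 s2 i j] else acc) := by
    funext acc j
    simp only [fcsEntry]
  rw [hfun, PySem.List.foldl_append_if]

theorem fcs_main (s1 s2 : String) (ml : Int) (hml : 0 ≤ ml) :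
    find_common_substrings s1 s2 ml = find_common_substrings_alt s1 s2 ml := by
  unfold find_common_substrings find_common_substrings_alt
  simp only
  apply PySem.List.foldl_congr_mem
  intro acc i hi
  rw [PySem.List.mem_pyRange_one, PySem.Str.len_eq] at hi
  obtain ⟨q, rfl⟩ : ∃ q : Nat, i = (q : Int) := ⟨i.toNat, by omega⟩
  have hq : q < s1.toList.length := by
    have := hi.2; simp at this ⊢; omega
  rw [A_inner]
  have hlen : PySem.Str.len s1 = (s1.toList.length : Int) := by simp [PySem.Str.len_eq]
  rcases (by omega : 1 ≤ ml ∨ ml = 0) with h1 | h0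
  · have hmlc : ((ml.toNat : Nat) : Int) = ml := by omega
    have hfuel : (PySem.Str.len s1 + 1 - ((q : Int) + ml)).toNat
        = ((s1.toList.length : Int) + 1 - ((q : Int) + ((ml.toNat : Nat) : Int))).toNat := by
      rw [hlen, hmlc]
    have hstart : (q : Int) + ml = (q : Int) + ((ml.toNat : Nat) : Int) := by omega
    rw [hfuel, hstart]
    rw [inner_spec s1 s2 q _ ml.toNat 0 acc (by omega) rfl (by omega) (by omega) (by
      intro x hx
      exact (occSet_mem_bounds s1 s2 q ml.toNat x hx).1)]
    rw [hlen]
  · subst h0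
    -- min_length = 0: the first iteration emits ('', i, i, 0, 0) on both sides,
    -- then the loop continues exactly as for substring length 1
    have hfz : (PySem.Str.len s1 + 1 - ((q : Int) + 0)).toNat = (s1.toList.length - q) + 1 := by
      rw [hlen]; omega
    rw [hfz]
    simp only [fcsAltInner]
    have hslice : (PySem.Str.slice s1 (some (q : Int)) (some ((q : Int) + 0))).toList = [] := by
      have := slice_toList s1 q 0
      simpa using this
    have hp' : PySem.Str.findFrom s2 (PySem.Str.slice s1 (some (q : Int)) (some ((q : Int) + 0))) 0 none = 0 := by
      simp only [PySem.Str.findFrom_eq]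
      rw [PySem.Chars.findFrom_zero, hslice]
      exact PySem.Chars.find_nil _
    rw [hp']
    rw [if_neg (by norm_num)]
    have hj : ((q : Int) + 0 + 1) = ((q : Int) + ((1 : Nat) : Int)) := by push_cast; ring
    rw [hj]
    rw [inner_spec s1 s2 q _ 1 0 _ (by omega) (by omega) (by omega) (by omega) (by
      intro x hx
      exact (occSet_mem_bounds s1 s2 q 1 x hx).1)]
    conv_lhs => rw [PySem.List.pyRange_one_cons (show (q : Int) + 0 < PySem.Str.len s1 + 1 by rw [hlen]; omega)]
    rw [List.filter_cons_of_pos (by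
      simp only [PySem.Str.isIn_eq]
      rw [hslice]
      exact PySem.Chars.isIn_nil _)]
    rw [List.map_cons]
    have hfind : PySem.Str.find s2 (PySem.Str.slice s1 (some (q : Int)) (some ((q : Int) + 0))) = 0 := by
      simp only [PySem.Str.find_eq]
      rw [hslice]
      exact PySem.Chars.find_nil _
    have hentry : fcsEntry s1 s2 (q : Int) ((q : Int) + 0)
        = (PySem.Str.slice s1 (some (q : Int)) (some ((q : Int) + 0)), (q : Int), (q : Int) + 0, 0, 0 + ((q : Int) + 0 - (q : Int))) := by
      unfold fcsEntry
      rw [hfind]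
    rw [hentry]
    simp only [List.append_assoc, List.singleton_append]
    rw [hlen, hj]

-- ===== VERDICT (by name: the statement is the Claim_ definition above) =====
theorem find_common_substrings_spec : Claim_equal_find_common_substrings := by
  intro s1 s2 ml hdom hpre
  unfold Spec_find_common_substrings
  unfold Pre_find_common_substrings at hpre
  exact fcs_main s1 s2 ml hpre
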